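-- pv_equiv track=rewrite | github.com/RutulPatel007/MIPS-assembler-and-processor | Assembler/assembler.py | find_label_line_number
-- ===== SOURCE A (Python) =====
-- def find_label_line_number(mips_code, target_instruction):
--     lines = mips_code.strip().split('\n')
--     line_number =0
--     for line in lines:
--         line_number+=1
--         if target_instruction in line:
--             # label = line.split(':')[0].strip()
--             break
--         if 'la' in line:
--             line_number += 1
--         if ':' in line:
--             line_number-=1
--
--     return line_number
-- ===== SOURCE B (Python) =====
-- def find_label_line_number(mips_code, target_instruction):
--     def remaining(lines):
--         # value contributed by `lines`, composed on return (no running counter)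
--         if not lines:
--             return 0
--         head = lines[0]
--         if target_instruction in head:
--             return 1
--         return 1 + ('la' in head) - (':' in head) + remaining(lines[1:])
--     return remaining(mips_code.strip().split('\n'))
-- ===== Notes on version B (the rewrite author's own statement) =====
-- stated objective: alternative
-- what changed: Replaced A's imperative loop with a mutable break-dependent counter by structural recursion that composes each line's contribution on return, with no accumulator or loop state.
import Mathlib
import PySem

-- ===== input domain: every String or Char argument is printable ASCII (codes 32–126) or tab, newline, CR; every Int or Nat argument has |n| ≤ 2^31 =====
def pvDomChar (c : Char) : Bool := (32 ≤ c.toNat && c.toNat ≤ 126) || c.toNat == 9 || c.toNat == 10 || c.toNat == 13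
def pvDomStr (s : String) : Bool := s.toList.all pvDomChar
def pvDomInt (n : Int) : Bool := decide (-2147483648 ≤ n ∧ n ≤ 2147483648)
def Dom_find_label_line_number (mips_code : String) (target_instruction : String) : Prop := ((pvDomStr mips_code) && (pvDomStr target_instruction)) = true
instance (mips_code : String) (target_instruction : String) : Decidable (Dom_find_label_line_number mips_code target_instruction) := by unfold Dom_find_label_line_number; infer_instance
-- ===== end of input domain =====

-- B replaces A's imperative counter loop by structural recursion composing each line's contribution on return; return values are proved equal on the whole domain.

-- ===== PORT A =====
-- A's for-loop over lines with the mutable counter line_number, break included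
def pvGoA (target : List Char) : List (List Char) → Int → Int
  | [], n => n
  | l :: ls, n =>
    let n := n + 1
    if PySem.Chars.isIn target l then n
    else
      let n := if PySem.Chars.isIn ['l','a'] l then n + 1 else n
      let n := if PySem.Chars.isIn [':'] l then n - 1 else n
      pvGoA target ls n

def find_label_line_number (mips_code : String) (target_instruction : String) : Int :=
  let lines := PySem.Chars.splitOn (PySem.Chars.strip mips_code.toList) ['\n']
  pvGoA target_instruction.toList lines 0

-- ===== PORT B =====
-- B's helper `remaining`: accumulator-free structural recursion
def pvRemaining (target : List Char) : List (List Char) → Int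
  | [] => 0
  | head :: rest =>
    if PySem.Chars.isIn target head then 1
    else 1 + (if PySem.Chars.isIn ['l','a'] head then 1 else 0)
           - (if PySem.Chars.isIn [':'] head then 1 else 0)
           + pvRemaining target rest

def find_label_line_number_alt (mips_code : String) (target_instruction : String) : Int :=
  pvRemaining target_instruction.toList (PySem.Chars.splitOn (PySem.Chars.strip mips_code.toList) ['\n'])

-- ===== PRECONDITION & SPEC =====
def Spec_find_label_line_number (mips_code : String) (target_instruction : String) (out : Int) : Prop := out = find_label_line_number_alt mips_code target_instruction
instance (mips_code : String) (target_instruction : String) (out : Int) : Decidable (Spec_find_label_line_number mips_code target_instruction out) := by unfold Spec_find_label_line_number; infer_instance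

-- ===== CLAIM (what is proved, stated in full; the proofs are below) =====
def Claim_equal_find_label_line_number : Prop := ∀ (mips_code : String) (target_instruction : String), Dom_find_label_line_number mips_code target_instruction → Spec_find_label_line_number mips_code target_instruction (find_label_line_number mips_code target_instruction)

-- ===== LEMMAS AND PROOFS =====

theorem pvGoA_eq (target : List Char) (lines : List (List Char)) :
    ∀ n : Int, pvGoA target lines n = n + pvRemaining target lines := by
  induction lines with
  | nil => intro n; simp [pvGoA, pvRemaining]
  | cons l ls ih =>
    intro n
    by_cases h : PySem.Chars.isIn target l = true
    · simp [pvGoA, pvRemaining, h]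
    · simp only [pvGoA, pvRemaining, h, if_false, Bool.false_eq_true]
      rw [ih]
      by_cases h1 : PySem.Chars.isIn ['l','a'] l = true <;>
        by_cases h2 : PySem.Chars.isIn [':'] l = true <;>
          simp [h1, h2] <;> ring

-- ===== VERDICT (by name: the statement is the Claim_ definition above) =====
theorem find_label_line_number_spec : Claim_equal_find_label_line_number := by
  intro mips_code target_instruction _
  unfold Spec_find_label_line_number find_label_line_number find_label_line_number_alt
  rw [pvGoA_eq]
  simp
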